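-- pv_equiv track=rewrite | github.com/codingwatching/skyvern | skyvern/schemas/google_sheets.py | extract_a1_sheet_prefix
-- ===== SOURCE A (Python) =====
-- def extract_a1_sheet_prefix(a1: str | None) -> str | None:
--     """Return the unquoted sheet title from an A1 string (e.g. ``'Target'!B2:C3`` -> ``Target``)."""
--     if not a1:
--         return None
--     if a1.startswith("'"):
--         idx = 1
--         while idx < len(a1):
--             if a1[idx] == "'":
--                 if idx + 1 < len(a1) and a1[idx + 1] == "'":
--                     idx += 2
--                     continue
--                 break
--             idx += 1
--         if idx < len(a1) and idx + 1 < len(a1) and a1[idx + 1] == "!":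
--             return a1[1:idx].replace("''", "'") or None
--         return None
--     if "!" in a1:
--         sheet_part = a1.partition("!")[0]
--         return sheet_part or None
--     return None
-- ===== SOURCE B (Python) =====
-- def extract_a1_sheet_prefix(a1):
--     """Return the unquoted sheet title from an A1 string (e.g. ``'Target'!B2:C3`` -> ``Target``)."""
--     if not a1:
--         return None
--     if a1[0] != "'":
--         i = a1.find("!")
--         if i == -1:
--             return None
--         return a1[:i] or None
--     # quoted title: consume the characters once, building the unescaped title as we go
--     it = iter(a1)
--     next(it)  # skip the opening quote
--     parts = []
--     for c in it:
--         if c != "'":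
--             parts.append(c)
--             continue
--         nxt = next(it, None)
--         if nxt == "'":
--             parts.append("'")
--         elif nxt == "!":
--             return "".join(parts) or None
--         else:
--             return None
--     return None
-- ===== Notes on version B (the rewrite author's own statement) =====
-- stated objective: simpler
-- what changed: The quoted branch no longer runs A's index loop to locate the closing quote and then re-slices the string and post-processes the slice with a doubled-quote-unescaping replace: B consumes the characters once with an iterator, handling escapes as it goes and building the unescaped title directly; the non-quoted branch uses find instead of a membership test plus partition.
import Mathlib
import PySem

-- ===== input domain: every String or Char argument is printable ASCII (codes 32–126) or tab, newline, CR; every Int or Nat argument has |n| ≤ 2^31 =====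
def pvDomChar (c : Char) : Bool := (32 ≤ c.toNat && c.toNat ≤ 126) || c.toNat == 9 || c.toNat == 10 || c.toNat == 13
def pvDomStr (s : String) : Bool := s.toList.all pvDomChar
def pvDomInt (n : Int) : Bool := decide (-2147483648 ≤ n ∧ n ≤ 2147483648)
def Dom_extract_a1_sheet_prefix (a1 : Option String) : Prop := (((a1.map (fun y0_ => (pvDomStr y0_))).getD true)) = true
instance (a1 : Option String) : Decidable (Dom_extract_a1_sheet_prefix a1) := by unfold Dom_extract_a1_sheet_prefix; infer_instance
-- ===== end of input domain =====

-- B replaces A's index-based quote scan + slice + replace("''","'") by a single forward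
-- consumer that builds the unescaped title as it goes (objective: simpler, one pass, no re-slicing).

-- ===== PORT A =====
-- the `while idx < len(a1): …` loop of A; returns the final idx
def pvALoop (s : List Char) (idx : Nat) : Nat :=
  if h : idx < s.length then
    if s[idx] = '\'' then
      if h2 : idx + 1 < s.length then
        if s[idx + 1] = '\'' then pvALoop s (idx + 2) else idx
      else idx
    else pvALoop s (idx + 1)
  else idx
termination_by s.length - idx

def extract_a1_sheet_prefix (a1 : Option String) : Option String :=
  match a1 with
  | none => none
  | some s =>
    if s = "" then none                                   -- `if not a1`
    else if PySem.Str.startswith s "'" then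
      let l := s.toList
      let idx := pvALoop l 1
      if idx < l.length ∧ idx + 1 < l.length ∧ l[idx + 1]? = some '!' then
        let content := PySem.Str.replace
          (String.ofList (PySem.List.slice l (some 1) (some (idx : Int)))) "''" "'"  -- a1[1:idx].replace("''","'")
        if content = "" then none else some content       -- `… or None`
      else none
    else if PySem.Str.isIn "!" s then
      -- a1.partition("!")[0]: everything before the FIRST "!" (hand port, exact: Str.find points at that first occurrence)
      let i := PySem.Str.find s "!"
      let sheet_part := String.ofList (s.toList.take i.toNat)
      if sheet_part = "" then none else some sheet_part   -- `sheet_part or None`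
    else none

-- ===== PORT B =====
-- the `for c in it` consumer of Source B: parts is the accumulated unescaped title
def pvBQuoted : List Char → List Char → Option String
  | [], _ => none
  | c :: rest, parts =>
    if c ≠ '\'' then pvBQuoted rest (parts ++ [c])
    else
      match rest with
      | '\'' :: rest2 => pvBQuoted rest2 (parts ++ ['\''])        -- escaped quote
      | '!' :: _ => if parts = [] then none else some (String.ofList parts)  -- `"".join(parts) or None`
      | _ => none                                                  -- next(it, None) ∉ {"'", "!"}
termination_by t _ => t.length

def extract_a1_sheet_prefix_alt (a1 : Option String) : Option String :=
  match a1 with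
  | none => none
  | some s =>
    if s = "" then none                                    -- `if not a1`
    else if s.toList.head? ≠ some '\'' then                -- `a1[0] != "'"`
      let i := PySem.Str.find s "!"
      if i = -1 then none
      else
        let pre := s.toList.take i.toNat                   -- a1[:i]
        if pre = [] then none else some (String.ofList pre)  -- `… or None`
    else pvBQuoted (s.toList.drop 1) []                    -- consume the chars after the opening quote

-- ===== PRECONDITION & SPEC =====
def Spec_extract_a1_sheet_prefix (a1 : Option String) (out : Option String) : Prop := out = extract_a1_sheet_prefix_alt a1
instance (a1 : Option String) (out : Option String) : Decidable (Spec_extract_a1_sheet_prefix a1 out) := by unfold Spec_extract_a1_sheet_prefix; infer_instance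

-- ===== CLAIM (what is proved, stated in full; the proofs are below) =====
def Claim_equal_extract_a1_sheet_prefix : Prop := ∀ (a1 : Option String), Dom_extract_a1_sheet_prefix a1 → Spec_extract_a1_sheet_prefix a1 (extract_a1_sheet_prefix a1)

-- ===== LEMMAS AND PROOFS =====

-- how far A's scan moves, expressed on the suffix it scans
def pvScan : List Char → Nat
  | [] => 0
  | [c] => if c = '\'' then 0 else 1
  | c :: d :: r => if c = '\'' then (if d = '\'' then pvScan r + 2 else 0) else pvScan (d :: r) + 1

-- what Python's replace("''","'") computes, structurally
def pvRepQ : List Char → List Char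
  | [] => []
  | [c] => [c]
  | c :: d :: r => if c = '\'' ∧ d = '\'' then '\'' :: pvRepQ r else c :: pvRepQ (d :: r)

-- the common specification of the quoted branch: the unescaped title, or none on failure
def pvParseQ : List Char → Option (List Char)
  | [] => none
  | [_] => none
  | c :: d :: r =>
    if c = '\'' then
      if d = '\'' then (pvParseQ r).map ('\'' :: ·)
      else if d = '!' then some []
      else none
    else (pvParseQ (d :: r)).map (c :: ·)

theorem pvScan_cons_ne (c : Char) (r : List Char) (h : ¬ c = '\'') : pvScan (c :: r) = pvScan r + 1 := by
  cases r <;> simp [pvScan, h]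

theorem pvRepQ_cons_ne (c : Char) (r : List Char) (h : ¬ c = '\'') : pvRepQ (c :: r) = c :: pvRepQ r := by
  cases r <;> simp [pvRepQ, h]

theorem pvALoop_eq_scan (s : List Char) (idx : Nat) :
    pvALoop s idx = idx + pvScan (s.drop idx) := by
  by_cases h : idx < s.length
  · rw [pvALoop]
    have hd : s.drop idx = s[idx] :: s.drop (idx + 1) := List.drop_eq_getElem_cons h
    by_cases hq : s[idx] = '\''
    · by_cases h2 : idx + 1 < s.length
      · have hd2 : s.drop (idx + 1) = s[idx+1] :: s.drop (idx + 2) := List.drop_eq_getElem_cons h2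
        by_cases hq2 : s[idx+1] = '\''
        · have ih := pvALoop_eq_scan s (idx + 2)
          rw [hd, hd2, hq, hq2, show pvScan ('\'' :: '\'' :: s.drop (idx + 2)) = pvScan (s.drop (idx + 2)) + 2 from by simp [pvScan]]
          simp [h, hq, h2, hq2, ih]
          omega
        · rw [hd, hd2, hq, show pvScan ('\'' :: s[idx+1] :: s.drop (idx + 2)) = 0 from by simp [pvScan, hq2]]
          simp [h, hq, h2, hq2]
      · have hd2 : s.drop (idx + 1) = [] := List.drop_eq_nil_of_le (by omega)
        rw [hd, hd2, hq, show pvScan ['\''] = 0 from by simp [pvScan]]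
        simp [h, hq, h2]
    · have ih := pvALoop_eq_scan s (idx + 1)
      rw [hd, pvScan_cons_ne _ _ hq]
      simp [h, hq, ih]
      omega
  · rw [pvALoop]
    simp [h, List.drop_eq_nil_of_le (by omega : s.length ≤ idx), pvScan]
termination_by s.length - idx

theorem pvGo_eq (fuel : Nat) : ∀ (l acc : List Char), l.length ≤ fuel →
    PySem.Chars.replace.go ['\'', '\''] ['\''] fuel l acc = acc.reverse ++ pvRepQ l := by
  induction fuel with
  | zero =>
    intro l acc hl
    have : l = [] := List.eq_nil_of_length_eq_zero (by omega)
    subst this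
    simp [PySem.Chars.replace.go, pvRepQ]
  | succ n ih =>
    intro l acc hl
    match l with
    | [] => simp [PySem.Chars.replace.go, pvRepQ]
    | [c] =>
      have hpre : List.isPrefixOf ['\'', '\''] [c] = false := by
        simp [List.isPrefixOf]
      rw [PySem.Chars.replace.go]
      simp only [hpre]
      rw [ih [] (c :: acc) (by simp)]
      simp [pvRepQ]
    | c :: d :: r =>
      by_cases hq : c = '\'' ∧ d = '\''
      · obtain ⟨hc, hd⟩ := hq
        subst hc hd
        rw [PySem.Chars.replace.go]
        have hpre : List.isPrefixOf ['\'', '\''] ('\'' :: '\'' :: r) = true := by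
          simp [List.isPrefixOf]
        simp only [hpre, if_true, List.length_cons, List.length_nil, List.drop_succ_cons,
          List.drop_zero, List.reverse_singleton, List.singleton_append]
        rw [ih r ('\'' :: acc) (by simp at hl ⊢; omega)]
        simp [pvRepQ]
      · have hpre : List.isPrefixOf ['\'', '\''] (c :: d :: r) = false := by
          simp [List.isPrefixOf]
          intro hc hd
          exact absurd ⟨hc.symm, hd.symm⟩ hq
        rw [PySem.Chars.replace.go]
        simp only [hpre]
        rw [ih (d :: r) (c :: acc) (by simp at hl ⊢; omega)]
        simp [pvRepQ, hq]

theorem pvReplace_eq_repQ (l : List Char) :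
    PySem.Chars.replace l ['\'', '\''] ['\''] = pvRepQ l := by
  rw [PySem.Chars.replace]
  simp [pvGo_eq l.length l [] le_rfl]

theorem pvA_quoted_eq_parse (t : List Char) :
    (if pvScan t + 1 < t.length ∧ t[pvScan t + 1]? = some '!'
      then some (pvRepQ (t.take (pvScan t))) else none) = pvParseQ t := by
  induction t using pvParseQ.induct with
  | case1 => simp [pvScan, pvParseQ]
  | case2 c =>
    rw [show pvParseQ [c] = none from by simp [pvParseQ]]
    rw [if_neg]
    intro ⟨h1, _⟩
    by_cases hc : c = '\'' <;> simp [pvScan, hc] at h1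
  | case3 r ih =>
    rw [show pvParseQ ('\'' :: '\'' :: r) = (pvParseQ r).map ('\'' :: ·) from by simp [pvParseQ]]
    rw [← ih]
    have hsc : pvScan ('\'' :: '\'' :: r) = pvScan r + 2 := by simp [pvScan]
    have hidx : ('\'' :: '\'' :: r)[pvScan r + 2 + 1]? = r[pvScan r + 1]? := by
      rw [show pvScan r + 2 + 1 = (pvScan r + 1) + 1 + 1 from by omega,
        List.getElem?_cons_succ, List.getElem?_cons_succ]
    have htake : List.take (pvScan r + 2) ('\'' :: '\'' :: r) = '\'' :: '\'' :: List.take (pvScan r) r := by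
      rw [show pvScan r + 2 = (pvScan r + 1) + 1 from by omega, List.take_succ_cons, List.take_succ_cons]
    rw [hsc]
    simp only [hidx, htake, List.length_cons]
    simp only [show (pvScan r + 2 + 1 < r.length + 1 + 1) ↔ (pvScan r + 1 < r.length) from by omega]
    by_cases hcond : pvScan r + 1 < r.length ∧ r[pvScan r + 1]? = some '!'
    · rw [if_pos hcond, if_pos hcond]
      simp [pvRepQ]
    · rw [if_neg hcond, if_neg hcond]
      simp
  | case4 r _ => simp [pvScan, pvParseQ, pvRepQ]
  | case5 d r hd hb => simp [pvScan, pvParseQ, hd, hb]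
  | case6 c d r hc ih =>
    rw [show pvParseQ (c :: d :: r) = (pvParseQ (d :: r)).map (c :: ·) from by simp [pvParseQ, hc]]
    rw [← ih]
    rw [pvScan_cons_ne c (d :: r) hc]
    simp only [List.getElem?_cons_succ, List.take_succ_cons, List.length_cons]
    simp only [show (pvScan (d :: r) + 1 + 1 < r.length + 1 + 1) ↔ (pvScan (d :: r) + 1 < r.length + 1) from by omega]
    by_cases hcond : pvScan (d :: r) + 1 < r.length + 1 ∧ r[pvScan (d :: r)]? = some '!'
    · rw [if_pos hcond, if_pos hcond]
      simp [pvRepQ_cons_ne c _ hc]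
    · rw [if_neg hcond, if_neg hcond]
      simp

theorem pvBQuoted_eq_parse (t : List Char) : ∀ (parts : List Char),
    pvBQuoted t parts =
      (pvParseQ t).bind (fun m => if parts ++ m = [] then none else some (String.ofList (parts ++ m))) := by
  induction t using pvParseQ.induct with
  | case1 => intro parts; simp [pvBQuoted, pvParseQ]
  | case2 c =>
    intro parts
    by_cases hc : c = '\''
    · subst hc; simp [pvBQuoted, pvParseQ]
    · simp [pvBQuoted, pvParseQ, hc]
  | case3 r ih =>
    intro parts
    rw [show pvBQuoted ('\'' :: '\'' :: r) parts = pvBQuoted r (parts ++ ['\'']) from by simp [pvBQuoted]]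
    rw [ih]
    rw [show pvParseQ ('\'' :: '\'' :: r) = (pvParseQ r).map ('\'' :: ·) from by simp [pvParseQ]]
    cases pvParseQ r with
    | none => simp
    | some m => simp
  | case4 r _ =>
    intro parts
    rw [show pvParseQ ('\'' :: '!' :: r) = some [] from by simp [pvParseQ]]
    simp [pvBQuoted]
  | case5 d r hd hb =>
    intro parts
    rw [show pvParseQ ('\'' :: d :: r) = none from by simp [pvParseQ, hd, hb]]
    simp [pvBQuoted, hd, hb]
  | case6 c d r hc ih =>
    intro parts
    rw [show pvBQuoted (c :: d :: r) parts = pvBQuoted (d :: r) (parts ++ [c]) from by rw [pvBQuoted.eq_def]; simp [hc]]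
    rw [ih]
    rw [show pvParseQ (c :: d :: r) = (pvParseQ (d :: r)).map (c :: ·) from by simp [pvParseQ, hc]]
    cases pvParseQ (d :: r) with
    | none => simp
    | some m => simp

-- ===== VERDICT (by name: the statement is the Claim_ definition above) =====
theorem extract_a1_sheet_prefix_spec : Claim_equal_extract_a1_sheet_prefix := by
  intro a1 _
  unfold Spec_extract_a1_sheet_prefix
  match a1 with
  | none => rfl
  | some s =>
    simp only [extract_a1_sheet_prefix, extract_a1_sheet_prefix_alt]
    by_cases hs : s = ""
    · simp [hs]
    · rw [if_neg hs, if_neg hs]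
      cases hL : s.toList with
      | nil => exact absurd (by simpa using congrArg String.ofList hL) hs
      | cons c t =>
        by_cases hc : c = '\''
        · -- quoted branch on both sides
          subst hc
          have hsw : PySem.Str.startswith s "'" = true := by
            rw [PySem.Str.startswith_eq, hL]
            simp [PySem.Chars.startswith, List.isPrefixOf]
          have hhd : ¬ (('\'' :: t).head? ≠ some '\'') := by simp
          rw [if_pos hsw, if_neg hhd]
          simp only [List.drop_succ_cons, List.drop_zero]
          have e1 : pvALoop ('\'' :: t) 1 = pvScan t + 1 := by
            rw [pvALoop_eq_scan]
            simp [Nat.add_comm]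
          rw [e1]
          have hsl : PySem.List.slice ('\'' :: t) (some 1) (some ((pvScan t + 1 : Nat) : Int)) = t.take (pvScan t) := by
            have h := PySem.List.slice_natCast ('\'' :: t) 1 (pvScan t + 1)
            simpa using h
          rw [hsl]
          have hcont : PySem.Str.replace (String.ofList (t.take (pvScan t))) "''" "'"
              = String.ofList (pvRepQ (t.take (pvScan t))) := by
            have h := PySem.Str.toList_replace (String.ofList (t.take (pvScan t))) "''" "'"
            rw [show ("''" : String).toList = ['\'', '\''] from rfl, show ("'" : String).toList = ['\''] from rfl,
              String.toList_ofList, pvReplace_eq_repQ] at h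
            rw [← h, String.ofList_toList]
          rw [hcont]
          have hcnd : (pvScan t + 1 < ('\'' :: t).length ∧ pvScan t + 1 + 1 < ('\'' :: t).length ∧
              ('\'' :: t)[pvScan t + 1 + 1]? = some '!')
              ↔ (pvScan t + 1 < t.length ∧ t[pvScan t + 1]? = some '!') := by
            rw [List.getElem?_cons_succ, List.length_cons]
            constructor
            · rintro ⟨_, hb, hp⟩
              exact ⟨by omega, hp⟩
            · rintro ⟨ha, hp⟩
              exact ⟨by omega, by omega, hp⟩
          rw [pvBQuoted_eq_parse, ← pvA_quoted_eq_parse]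
          simp only [hcnd, List.nil_append]
          by_cases hcond : pvScan t + 1 < t.length ∧ t[pvScan t + 1]? = some '!'
          · rw [if_pos hcond, if_pos hcond]
            simp
          · rw [if_neg hcond, if_neg hcond]
            rfl
        · -- non-quoted branch on both sides
          have hsw : ¬ PySem.Str.startswith s "'" = true := by
            rw [PySem.Str.startswith_eq, hL]
            simp [PySem.Chars.startswith, List.isPrefixOf]
            exact fun h => hc h.symm
          have hhd : (c :: t).head? ≠ some '\'' := by simp [hc]
          rw [if_neg hsw, if_pos hhd]
          by_cases hin : PySem.Str.isIn "!" s = true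
          · have hfind : ¬ PySem.Str.find s "!" = -1 := by
              exact (PySem.Str.find_ne_neg_one_iff s "!").mpr ((PySem.Str.isIn_iff_infix "!" s).mp hin)
            rw [if_pos hin, if_neg hfind]
            simp
          · have hfind : PySem.Str.find s "!" = -1 := by
              by_contra hne
              exact hin ((PySem.Str.isIn_iff_infix "!" s).mpr ((PySem.Str.find_ne_neg_one_iff s "!").mp hne))
            rw [if_neg hin, if_pos hfind]
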